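-- pv_equiv track=rewrite | github.com/pujitha9603/gfg | Medium/Check if frequencies can be equal/check-if-frequencies-can-be-equal.py | sameFreq
-- ===== SOURCE A (Python) =====
-- def sameFreq(s):
--     # code here
--     d = {}
--     for i in s:
--         if i not in d:
--             d[i] = 1
--         else:
--             d[i] += 1
--     f = list(d.values())
--     # l = sorted(list(set(f)))
--     # if len(l) == 1:
--     #     return 1
--     # elif len(l) == 2:
--     #     a = l[0] - 1
--     #     if a == 0 or a == l[-1]:
--     #         return 1
--     #     else:
--     #         return 0
--     # else:
--     #     return 0
--     if len(set(f)) == 1: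
--         return 1
--     else:
--         for i in range(len(f)):
--             f[i] = f[i] - 1
--             if len(set(f)) == 1 or (f[i] == 0 and len(set(f)) == 2):
--                 return 1
--             f[i] = f[i] + 1
--         else:
--             return 0
-- ===== SOURCE B (Python) =====
-- def sameFreq(s):
--     freq = {}
--     for ch in s:
--         freq[ch] = freq.get(ch, 0) + 1
--     cc = {}
--     for v in freq.values():
--         cc[v] = cc.get(v, 0) + 1
--     if len(cc) == 0:
--         return 0
--     if len(cc) == 1:
--         return 1
--     if len(cc) == 2:
--         (va, ca), (vb, cb) = cc.items()
--         (v1, c1), (v2, c2) = ((va, ca), (vb, cb)) if va < vb else ((vb, cb), (va, ca))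
--         return 1 if (v1 == 1 and c1 == 1) or (v2 == v1 + 1 and c2 == 1) else 0
--     return 0
-- ===== Notes on version B (the rewrite author's own statement) =====
-- stated objective: simpler
-- what changed: Replaces A's try-each-index decrement-and-recompute-set loop with a closed-form case analysis on the frequency-of-frequencies table (count the multiplicity of each character count, then decide by the two (value,multiplicity) pairs).
import Mathlib
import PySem

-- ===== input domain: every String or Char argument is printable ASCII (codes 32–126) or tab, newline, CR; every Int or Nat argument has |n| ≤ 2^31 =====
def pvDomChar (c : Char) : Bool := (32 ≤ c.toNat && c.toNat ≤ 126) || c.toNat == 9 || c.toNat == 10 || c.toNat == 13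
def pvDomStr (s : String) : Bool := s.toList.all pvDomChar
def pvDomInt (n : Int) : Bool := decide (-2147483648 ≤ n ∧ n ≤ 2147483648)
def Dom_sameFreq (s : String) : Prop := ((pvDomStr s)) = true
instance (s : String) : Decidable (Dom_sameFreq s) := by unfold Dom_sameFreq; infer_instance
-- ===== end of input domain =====

-- B replaces A's decrement-each-index-and-recompute-set loop by a closed-form case
-- analysis on the frequency-of-frequencies table (simpler; same return value everywhere).

-- ===== PORT A =====
-- 'for i in range(len(f))': decrement f[i], test, restore — each iteration starts from
-- the same f, so the loop is a recursion on the index over the unchanged list.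
def sameFreqGo (f : List Int) (i : Nat) : Int :=
  if h : i < f.length then
    let g := f.set i (f[i] - 1)
    if (PySem.Set.ofList g).length == 1 || (f[i] - 1 == 0 && (PySem.Set.ofList g).length == 2)
    then 1
    else sameFreqGo f (i + 1)
  else 0
termination_by f.length - i

-- the part of A after 'f = list(d.values())'
def sameFreqDecA (f : List Int) : Int :=
  if (PySem.Set.ofList f).length == 1 then 1
  else sameFreqGo f 0

def sameFreq (s : String) : Int :=
  let d := s.toList.foldl
    (fun d c => if d.contains c = false then d.insert c 1 else d.insert c (d.getD c 0 + 1))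
    PySem.Dict.empty
  sameFreqDecA d.values

-- ===== PORT B =====
-- the part of B after building freq: cc = counts of counts, then a closed-form decision
def sameFreqDecB (f : List Int) : Int :=
  let cc := f.foldl (fun d v => d.insert v (d.getD v 0 + 1)) (PySem.Dict.empty : PySem.Dict Int Int)
  if cc.items.length == 0 then 0
  else if cc.items.length == 1 then 1
  else if cc.items.length == 2 then
    match cc.items with
    | [(va, ca), (vb, cb)] =>
      let p := if va < vb then ((va, ca), (vb, cb)) else ((vb, cb), (va, ca))
      if (p.1.1 == 1 && p.1.2 == 1) || (p.2.1 == p.1.1 + 1 && p.2.2 == 1) then 1 else 0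
    | _ => 0
  else 0

def sameFreq_alt (s : String) : Int :=
  let freq := s.toList.foldl (fun d c => d.insert c (d.getD c 0 + 1)) PySem.Dict.empty
  sameFreqDecB freq.values

-- ===== PRECONDITION & SPEC =====
def Spec_sameFreq (s : String) (out : Int) : Prop := out = sameFreq_alt s
instance (s : String) (out : Int) : Decidable (Spec_sameFreq s out) := by unfold Spec_sameFreq; infer_instance

-- ===== CLAIM (what is proved, stated in full; the proofs are below) =====
def Claim_equal_sameFreq : Prop := ∀ (s : String), Dom_sameFreq s → Spec_sameFreq s (sameFreq s)

-- ===== LEMMAS AND PROOFS =====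

-- A's counting dict is the standard counter (the 'not in' branch inserts the same value)
theorem sameFreq_dict_eq (cs : List Char) :
    cs.foldl (fun d c => if d.contains c = false then d.insert c 1 else d.insert c (d.getD c 0 + 1))
      PySem.Dict.empty = PySem.Dict.counter cs := by
  have hstep : (fun (d : PySem.Dict Char Int) c =>
      if d.contains c = false then d.insert c 1 else d.insert c (d.getD c 0 + 1)) =
      (fun d c => d.insert c (d.getD c 0 + 1)) := by
    funext d c
    by_cases h : d.contains c
    · simp [h]
    · simp only [Bool.not_eq_true] at h
      simp [h, PySem.Dict.getD_of_not_contains d 0 h]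
  rw [hstep, PySem.Dict.foldl_insert_getD_add_one_eq_counter]

-- |set(l)| as a Finset cardinality
theorem setOfList_length_eq (l : List Int) :
    (PySem.Set.ofList l).length = l.toFinset.card := by
  have hnd := PySem.Set.nodup_ofList l
  have hfs : (PySem.Set.ofList l).toFinset = l.toFinset := by
    ext v; simp [PySem.Set.mem_ofList]
  rw [← hfs, List.toFinset_card_of_nodup hnd]

-- the loop condition at index j, as a total Bool
def sameFreqCond (f : List Int) (j : Nat) : Bool :=
  let g := f.set j (f.getD j 0 - 1)
  (PySem.Set.ofList g).length == 1 ||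
    (f.getD j 0 - 1 == 0 && (PySem.Set.ofList g).length == 2)

theorem sameFreqGo_eq_one_of (f : List Int) (i j : Nat) (hij : i ≤ j) (hj : j < f.length)
    (hc : sameFreqCond f j = true) : sameFreqGo f i = 1 := by
  rw [sameFreqCond] at hc
  simp only [List.getD_eq_getElem f 0 hj] at hc
  have H : ∀ k i, j - i = k → i ≤ j → sameFreqGo f i = 1 := by
    intro k
    induction k with
    | zero =>
        intro i h0 hij
        have hi : i = j := by omega
        subst hi
        rw [sameFreqGo]
        simp only [hj, dif_pos]
        simp [hc]
    | succ k ih =>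
        intro i h0 hij
        have hi : i < f.length := by omega
        rw [sameFreqGo]
        simp only [hi, dif_pos]
        split
        · rfl
        · exact ih (i + 1) (by omega) (by omega)
  exact H _ i rfl hij

theorem sameFreqGo_eq_zero_of (f : List Int) (i : Nat)
    (hc : ∀ j, i ≤ j → j < f.length → sameFreqCond f j = false) : sameFreqGo f i = 0 := by
  have H : ∀ k i, f.length - i = k → (∀ j, i ≤ j → j < f.length → sameFreqCond f j = false) →
      sameFreqGo f i = 0 := by
    intro k
    induction k with
    | zero =>
        intro i h0 _
        rw [sameFreqGo]
        simp only [dif_neg (by omega : ¬ i < f.length)]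
    | succ k ih =>
        intro i h0 hc
        have hi : i < f.length := by omega
        have hci := hc i le_rfl hi
        rw [sameFreqCond] at hci
        simp only [List.getD_eq_getElem f 0 hi] at hci
        rw [sameFreqGo]
        simp only [hi, dif_pos]
        split
        · rename_i hcond
          simp only [hci] at hcond
          exact absurd hcond (by simp)
        · exact ih (i + 1) (by omega) (fun j h1 h2 => hc j (by omega) h2)
  exact H _ i rfl hc

-- counts after setting one entry
theorem count_set_eq (l : List Int) (j : Nat) (hj : j < l.length) (w v : Int) :
    (l.set j w).count v = l.count v + (if v = w then 1 else 0) - (if v = l[j] then 1 else 0) := by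
  rw [List.count_set hj]
  simp only [beq_iff_eq]
  by_cases hv : v = l[j]
  · have h1 : 0 < l.count v := List.count_pos_iff.mpr (hv ▸ l.getElem_mem hj)
    split_ifs <;> omega
  · split_ifs <;> omega

-- evaluation of the loop condition when f takes exactly the two values a, b
theorem condEval (f : List Int) (a b : Int) (hab : a ≠ b)
    (hmem : ∀ x ∈ f, x = a ∨ x = b) (ha : a ∈ f) (hb : b ∈ f)
    (ha1 : 1 ≤ a) (hb1 : 1 ≤ b) (j : Nat) (hj : j < f.length) (hx : f[j] = a) :
    (sameFreqCond f j = true) ↔ (f.count a = 1 ∧ (a = b + 1 ∨ a = 1)) := by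
  rw [sameFreqCond]
  simp only [List.getD_eq_getElem f 0 hj, hx, setOfList_length_eq]
  have hca : 0 < f.count a := List.count_pos_iff.mpr ha
  have hcb : 0 < f.count b := List.count_pos_iff.mpr hb
  have hcount : ∀ v, (f.set j (a - 1)).count v =
      f.count v + (if v = a - 1 then 1 else 0) - (if v = a then 1 else 0) := by
    intro v
    rw [count_set_eq f j hj, hx]
  have hcount0 : ∀ v, v ≠ a → v ≠ b → f.count v = 0 := by
    intro v h1 h2
    rw [List.count_eq_zero]
    intro hv
    rcases hmem v hv with h | h <;> [exact h1 h; exact h2 h]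
  have hmemT : ∀ v, v ∈ (f.set j (a - 1)).toFinset ↔ 0 < (f.set j (a - 1)).count v := by
    intro v
    rw [List.mem_toFinset, List.count_pos_iff]
  by_cases hca1 : f.count a = 1
  · by_cases hab1 : a - 1 = b
    · have hT : (f.set j (a - 1)).toFinset = {b} := by
        ext v
        rw [hmemT v, hcount v, Finset.mem_singleton]
        by_cases h1 : v = a
        · subst h1
          have hv := hca1
          split_ifs <;> omega
        · by_cases h2 : v = b
          · subst h2
            split_ifs <;> omega
          · have hv := hcount0 v h1 h2
            split_ifs <;> omega
      rw [hT]
      simp only [Finset.card_singleton, Bool.or_eq_true, Bool.and_eq_true, beq_iff_eq]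
      constructor
      · intro _; exact ⟨hca1, Or.inl (by omega)⟩
      · intro _; left; simp
    · have hT : (f.set j (a - 1)).toFinset = {a - 1, b} := by
        ext v
        rw [hmemT v, hcount v, Finset.mem_insert, Finset.mem_singleton]
        by_cases h1 : v = a
        · subst h1
          split_ifs <;> omega
        · by_cases h2 : v = b
          · subst h2
            split_ifs <;> omega
          · by_cases h3 : v = a - 1
            · subst h3
              split_ifs <;> omega
            · have hv := hcount0 v h1 h2
              split_ifs
              all_goals omega
      rw [hT, Finset.card_pair hab1]
      simp only [Bool.or_eq_true, Bool.and_eq_true, beq_iff_eq]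
      constructor
      · rintro (h | ⟨h, -⟩)
        · omega
        · exact ⟨hca1, Or.inr (by omega)⟩
      · rintro ⟨-, h | h⟩
        · exact absurd (by omega : a - 1 = b) hab1
        · exact Or.inr ⟨by omega, by simp⟩
  · by_cases hab1 : a - 1 = b
    · have hT : (f.set j (a - 1)).toFinset = {a, b} := by
        ext v
        rw [hmemT v, hcount v, Finset.mem_insert, Finset.mem_singleton]
        by_cases h1 : v = a
        · subst h1
          split_ifs <;> omega
        · by_cases h2 : v = b
          · subst h2
            split_ifs <;> omega
          · have hv := hcount0 v h1 h2
            split_ifs <;> omega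
      rw [hT, Finset.card_pair hab]
      simp only [Bool.or_eq_true, Bool.and_eq_true, beq_iff_eq]
      apply iff_of_false
      · rintro (h | ⟨h, -⟩)
        all_goals omega
      · rintro ⟨h, -⟩; exact hca1 h
    · have hT : (f.set j (a - 1)).toFinset = {a - 1, a, b} := by
        ext v
        rw [hmemT v, hcount v, Finset.mem_insert, Finset.mem_insert, Finset.mem_singleton]
        by_cases h1 : v = a
        · subst h1
          split_ifs <;> omega
        · by_cases h2 : v = b
          · subst h2
            split_ifs <;> omega
          · by_cases h3 : v = a - 1
            · subst h3
              split_ifs <;> omega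
            · have hv := hcount0 v h1 h2
              split_ifs
              all_goals omega
      have hcard : ({a - 1, a, b} : Finset Int).card = 3 := by
        rw [Finset.card_insert_of_notMem (by simp; omega), Finset.card_pair hab]
      rw [hT, hcard]
      simp only [Bool.or_eq_true, Bool.and_eq_true, beq_iff_eq]
      apply iff_of_false
      · rintro (h | ⟨-, h⟩)
        all_goals omega
      · rintro ⟨h, -⟩; exact hca1 h

-- evaluation of the loop condition when f has at least three distinct values
theorem condEval3 (f : List Int) (hpos : ∀ x ∈ f, 1 ≤ x)
    (hcard : 3 ≤ f.toFinset.card) (j : Nat) (hj : j < f.length) :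
    sameFreqCond f j = false := by
  rw [sameFreqCond]
  simp only [List.getD_eq_getElem f 0 hj, setOfList_length_eq]
  have hxmem : f[j] ∈ f := List.getElem_mem hj
  have hx1 : 1 ≤ f[j] := hpos _ hxmem
  have hcount : ∀ v, (f.set j (f[j] - 1)).count v =
      f.count v + (if v = f[j] - 1 then 1 else 0) - (if v = f[j] then 1 else 0) := by
    intro v
    rw [count_set_eq f j hj]
  have hsub : f.toFinset \ {f[j]} ⊆ (f.set j (f[j] - 1)).toFinset := by
    intro v hv
    simp only [Finset.mem_sdiff, List.mem_toFinset, Finset.mem_singleton] at hv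
    rw [List.mem_toFinset, ← List.count_pos_iff, hcount v]
    have hv1 := List.count_pos_iff.mpr hv.1
    have hv2 := hv.2
    split_ifs <;> omega
  have hc2 : 2 ≤ (f.toFinset \ {f[j]}).card := by
    rw [Finset.card_sdiff]
    have h1 : ({f[j]} ∩ f.toFinset).card ≤ 1 :=
      le_trans (Finset.card_le_card Finset.inter_subset_left) (by simp)
    omega
  have hg2 : 2 ≤ (f.set j (f[j] - 1)).toFinset.card := le_trans hc2 (Finset.card_le_card hsub)
  rw [Bool.eq_false_iff]
  intro h
  simp only [Bool.or_eq_true, Bool.and_eq_true, beq_iff_eq] at h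
  rcases h with h | ⟨h0, h2⟩
  · omega
  · have hz : (0 : Int) ∉ f.toFinset \ {f[j]} := by
      simp only [Finset.mem_sdiff, List.mem_toFinset, Finset.mem_singleton]
      rintro ⟨h0f, -⟩
      have := hpos 0 h0f
      omega
    have hins : insert (0 : Int) (f.toFinset \ {f[j]}) ⊆ (f.set j (f[j] - 1)).toFinset := by
      intro v hv
      rcases Finset.mem_insert.mp hv with rfl | hv'
      · rw [List.mem_toFinset, ← List.count_pos_iff, hcount 0]
        have : (0 : Int) ≤ f.count 0 := by positivity
        split_ifs <;> omega
      · exact hsub hv'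
    have hle := Finset.card_le_card hins
    rw [Finset.card_insert_of_notMem hz] at hle
    omega

-- the core: the two decision procedures agree on any list of positive counts
theorem dec_eq (f : List Int) (hpos : ∀ x ∈ f, 1 ≤ x) :
    sameFreqDecA f = sameFreqDecB f := by
  unfold sameFreqDecA sameFreqDecB
  simp only [PySem.Dict.foldl_insert_getD_add_one_eq_counter, PySem.Dict.items_counter]
  have hmemf : ∀ x ∈ f, x ∈ PySem.Set.ofList f := fun x hx => (PySem.Set.mem_ofList f x).mpr hx
  have hnd := PySem.Set.nodup_ofList f
  rcases hS : PySem.Set.ofList f with _ | ⟨a, _ | ⟨b, _ | ⟨c, r⟩⟩⟩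
  · -- no distinct values: f is empty
    have hf : f = [] := by
      cases f with
      | nil => rfl
      | cons h tl =>
          have := hmemf h (List.mem_cons_self ..)
          rw [hS] at this
          exact absurd this (List.not_mem_nil)
    have h0 : sameFreqGo [] 0 = 0 := sameFreqGo_eq_zero_of [] 0 (by intro j _ hj; simp at hj)
    subst hf
    simp [h0]
  · -- one distinct value
    simp
  · -- two distinct values a ≠ b
    rw [hS] at hnd
    have hab : a ≠ b := by simp at hnd; exact hnd
    have ha : a ∈ f := (PySem.Set.mem_ofList f a).mp (by rw [hS]; simp)
    have hb : b ∈ f := (PySem.Set.mem_ofList f b).mp (by rw [hS]; simp)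
    have hmem2 : ∀ x ∈ f, x = a ∨ x = b := by
      intro x hx
      have := hmemf x hx
      rw [hS] at this
      simpa using this
    have hmem2' : ∀ x ∈ f, x = b ∨ x = a := fun x hx => (hmem2 x hx).symm
    have ha1 : 1 ≤ a := hpos a ha
    have hb1 : 1 ≤ b := hpos b hb
    have hgo : sameFreqGo f 0 =
        if (f.count a = 1 ∧ (a = b + 1 ∨ a = 1)) ∨ (f.count b = 1 ∧ (b = a + 1 ∨ b = 1))
        then 1 else 0 := by
      split_ifs with hP
      · rcases hP with hP | hP
        · obtain ⟨j, hj, hja⟩ := List.mem_iff_getElem.mp ha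
          exact sameFreqGo_eq_one_of f 0 j (Nat.zero_le j) hj
            ((condEval f a b hab hmem2 ha hb ha1 hb1 j hj hja).mpr hP)
        · obtain ⟨j, hj, hjb⟩ := List.mem_iff_getElem.mp hb
          exact sameFreqGo_eq_one_of f 0 j (Nat.zero_le j) hj
            ((condEval f b a hab.symm hmem2' hb ha hb1 ha1 j hj hjb).mpr hP)
      · apply sameFreqGo_eq_zero_of
        intro j _ hjlen
        rw [Bool.eq_false_iff]
        intro hc
        rcases hmem2 _ (List.getElem_mem hjlen) with hja | hjb
        · exact hP (Or.inl ((condEval f a b hab hmem2 ha hb ha1 hb1 j hjlen hja).mp hc))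
        · exact hP (Or.inr ((condEval f b a hab.symm hmem2' hb ha hb1 ha1 j hjlen hjb).mp hc))
    rw [hgo]
    simp only [List.map_cons, List.map_nil, List.length_cons, List.length_nil]
    norm_num
    rcases lt_trichotomy a b with h | h | h
    · simp only [if_pos h]
      split_ifs <;> omega
    · exact absurd h hab
    · simp only [if_neg (by omega : ¬ a < b)]
      split_ifs <;> omega
  · -- at least three distinct values
    have hcard3 : 3 ≤ f.toFinset.card := by
      rw [← setOfList_length_eq, hS]
      simp
    have hgo : sameFreqGo f 0 = 0 :=
      sameFreqGo_eq_zero_of f 0 (fun j _ hjlen => condEval3 f hpos hcard3 j hjlen)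
    rw [hgo]
    simp

-- ===== VERDICT =====
theorem sameFreq_spec : Claim_equal_sameFreq := by
  intro s _
  unfold Spec_sameFreq sameFreq sameFreq_alt
  rw [sameFreq_dict_eq, PySem.Dict.foldl_insert_getD_add_one_eq_counter]
  apply dec_eq
  intro x hx
  simp only [PySem.Dict.values, PySem.Dict.items_counter, List.map_map, List.mem_map] at hx
  obtain ⟨k, hk, hkx⟩ := hx
  have hkc : k ∈ s.toList := (PySem.Set.mem_ofList _ _).mp hk
  have hc := List.count_pos_iff.mpr hkc
  simp only [Function.comp] at hkx
  omega
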